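-- pv_equiv track=rewrite | github.com/Two-Kay/AoC | Day 4/PassportMadness.py | validate_passports
-- ===== SOURCE A (Python) =====
-- def validate_passports(data=None):
--     '''
--     Validates a passport for the correct types of entires (excluding the one you miss).
--
--     Returns the count of all valid passport read from a two-dimensional list.
--     '''
--     count = 0
--     for i in range(len(data)):
--         byr = False
--         iyr = False
--         eyr = False
--         hgt = False
--         hcl = False
--         ecl = False
--         pid = False
--
--         for j in range(len(data[i])):
--             entry = data[i][j].split(":")
--             if(entry[0] == "byr"):
--                 byr = True
--             elif(entry[0] == "iyr"):
--                 iyr = True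
--             elif(entry[0] == "eyr"):
--                 eyr = True
--             elif(entry[0] == "hgt"):
--                 hgt = True
--             elif(entry[0] == "hcl"):
--                 hcl = True
--             elif(entry[0] == "ecl"):
--                 ecl = True
--             elif(entry[0] == "pid"):
--                 pid = True
--
--         if(byr and iyr and eyr and hgt and hcl and ecl and pid):
--             count += 1
--
--     return count
-- ===== SOURCE B (Python) =====
-- REQUIRED = ("byr", "iyr", "eyr", "hgt", "hcl", "ecl", "pid")
--
--
-- def validate_passports(data=None):
--     # Sieve: repeatedly narrow the passport list, one pass per required field.
--     remaining = list(data)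
--     for field in REQUIRED:
--         remaining = [p for p in remaining
--                      if any(e.split(":")[0] == field for e in p)]
--     return len(remaining)
-- ===== Notes on version B (the rewrite author's own statement) =====
-- stated objective: alternative
-- what changed: Replaced the per-passport seven-flag inner loop and if/elif chain by a sieve: seven staged filtering passes, one per required field, each discarding passports lacking that field, returning the length of the surviving list.
import Mathlib
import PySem

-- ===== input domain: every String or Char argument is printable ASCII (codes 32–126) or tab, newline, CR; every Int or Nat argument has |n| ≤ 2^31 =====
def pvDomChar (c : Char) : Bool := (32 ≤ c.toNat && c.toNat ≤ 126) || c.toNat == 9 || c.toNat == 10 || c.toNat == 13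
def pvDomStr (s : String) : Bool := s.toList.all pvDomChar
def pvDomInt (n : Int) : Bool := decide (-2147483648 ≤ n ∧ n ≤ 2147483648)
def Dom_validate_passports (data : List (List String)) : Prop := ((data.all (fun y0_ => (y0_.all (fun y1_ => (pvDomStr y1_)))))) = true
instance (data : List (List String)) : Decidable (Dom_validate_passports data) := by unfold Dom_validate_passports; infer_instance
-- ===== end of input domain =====

-- B replaces the per-passport seven-flag scan by a sieve of seven staged filtering
-- passes, one per required field; same cost, different decomposition.

-- ===== PORT A =====
-- the inner for-loop over one passport's entries, carrying the seven flags
def vpGoA : List String → Bool × Bool × Bool × Bool × Bool × Bool × Bool → Bool × Bool × Bool × Bool × Bool × Bool × Bool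
  | [], st => st
  | s :: rest, (byr, iyr, eyr, hgt, hcl, ecl, pid) =>
    let e0 := ((PySem.Str.split? s ":").getD []).headI
    if e0 == "byr" then vpGoA rest (true, iyr, eyr, hgt, hcl, ecl, pid)
    else if e0 == "iyr" then vpGoA rest (byr, true, eyr, hgt, hcl, ecl, pid)
    else if e0 == "eyr" then vpGoA rest (byr, iyr, true, hgt, hcl, ecl, pid)
    else if e0 == "hgt" then vpGoA rest (byr, iyr, eyr, true, hcl, ecl, pid)
    else if e0 == "hcl" then vpGoA rest (byr, iyr, eyr, hgt, true, ecl, pid)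
    else if e0 == "ecl" then vpGoA rest (byr, iyr, eyr, hgt, hcl, true, pid)
    else if e0 == "pid" then vpGoA rest (byr, iyr, eyr, hgt, hcl, ecl, true)
    else vpGoA rest (byr, iyr, eyr, hgt, hcl, ecl, pid)

def validate_passports (data : List (List String)) : Int :=
  data.foldl (fun count p =>
    let st := vpGoA p (false, false, false, false, false, false, false)
    if st.1 && st.2.1 && st.2.2.1 && st.2.2.2.1 && st.2.2.2.2.1 && st.2.2.2.2.2.1 && st.2.2.2.2.2.2
    then count + 1 else count) 0

-- ===== PORT B =====
def vpRequired : List String := ["byr", "iyr", "eyr", "hgt", "hcl", "ecl", "pid"]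

-- any(e.split(":")[0] == field for e in p)
def vpHas (p : List String) (field : String) : Bool :=
  p.any (fun e => ((PySem.Str.split? e ":").getD []).headI == field)

def validate_passports_alt (data : List (List String)) : Int :=
  ((vpRequired.foldl (fun remaining field => remaining.filter (fun p => vpHas p field)) data).length : Int)

-- ===== PRECONDITION & SPEC =====
def Spec_validate_passports (data : List (List String)) (out : Int) : Prop := out = validate_passports_alt data
instance (data : List (List String)) (out : Int) : Decidable (Spec_validate_passports data out) := by unfold Spec_validate_passports; infer_instance

-- ===== CLAIM (what is proved, stated in full; the proofs are below) =====
def Claim_equal_validate_passports : Prop := ∀ (data : List (List String)), Dom_validate_passports data → Spec_validate_passports data (validate_passports data)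

-- ===== LEMMAS AND PROOFS =====
lemma vpGoA_spec (p : List String) : ∀ b1 b2 b3 b4 b5 b6 b7 : Bool,
    vpGoA p (b1, b2, b3, b4, b5, b6, b7) =
      (b1 || vpHas p "byr", b2 || vpHas p "iyr", b3 || vpHas p "eyr",
       b4 || vpHas p "hgt", b5 || vpHas p "hcl", b6 || vpHas p "ecl",
       b7 || vpHas p "pid") := by
  induction p with
  | nil => simp [vpGoA, vpHas]
  | cons s rest ih =>
    intro b1 b2 b3 b4 b5 b6 b7
    rw [vpGoA]
    simp only [vpHas, List.any_cons] at ih ⊢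
    split_ifs with h1 h2 h3 h4 h5 h6 h7 <;> rw [ih] <;> clear ih
    · simp_all
    · simp_all
    · simp_all
    · simp_all
    · simp_all
    · simp_all
    · simp_all
    · rw [Bool.not_eq_true] at h1 h2 h3 h4 h5 h6 h7
      rw [h1, h2, h3, h4, h5, h6, h7]
      simp

-- A's seven-way conjunction is "all required fields present"
lemma vpCond_eq (p : List String) :
    ((vpGoA p (false, false, false, false, false, false, false)).1 &&
     (vpGoA p (false, false, false, false, false, false, false)).2.1 &&
     (vpGoA p (false, false, false, false, false, false, false)).2.2.1 &&
     (vpGoA p (false, false, false, false, false, false, false)).2.2.2.1 &&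
     (vpGoA p (false, false, false, false, false, false, false)).2.2.2.2.1 &&
     (vpGoA p (false, false, false, false, false, false, false)).2.2.2.2.2.1 &&
     (vpGoA p (false, false, false, false, false, false, false)).2.2.2.2.2.2) =
    vpRequired.all (fun f => vpHas p f) := by
  rw [vpGoA_spec]
  simp [vpRequired, Bool.and_assoc]

-- staged filters collapse to one filter by the conjunction of the predicates
lemma vp_foldl_filter {α β : Type} (pred : α → β → Bool) (fields : List β) :
    ∀ xs : List α,
      fields.foldl (fun rem f => rem.filter (fun x => pred x f)) xs =
        xs.filter (fun x => fields.all (fun f => pred x f)) := by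
  induction fields with
  | nil => intro xs; simp
  | cons f rest ih =>
    intro xs
    rw [List.foldl_cons, ih, List.filter_filter]
    simp [Bool.and_comm]

-- A's counting fold is the length of the filter by the same condition
lemma vp_foldl_count (f : List String → Bool) (data : List (List String)) : ∀ c : Int,
    data.foldl (fun count p => if f p then count + 1 else count) c =
      c + ((data.filter f).length : Int) := by
  induction data with
  | nil => simp
  | cons p rest ih =>
    intro c
    rw [List.foldl_cons, List.filter_cons]
    split_ifs with h <;> simp [ih] <;> ring

-- ===== VERDICT (by name: the statement is the Claim_ definition above) =====
theorem validate_passports_spec : Claim_equal_validate_passports := by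
  intro data _
  show validate_passports data = validate_passports_alt data
  unfold validate_passports validate_passports_alt
  rw [vp_foldl_filter]
  have hf : (fun (count : Int) p =>
      let st := vpGoA p (false, false, false, false, false, false, false)
      if st.1 && st.2.1 && st.2.2.1 && st.2.2.2.1 && st.2.2.2.2.1 && st.2.2.2.2.2.1 && st.2.2.2.2.2.2
      then count + 1 else count) =
      (fun (count : Int) p =>
        if vpRequired.all (fun f => vpHas p f) then count + 1 else count) := by
    funext count p
    simp only [vpCond_eq]
  rw [hf, vp_foldl_count]
  ring
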